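-- pv_equiv track=rewrite | github.com/komajun365/competitive_programming | arc/arc121/b/main.py | calc
-- ===== SOURCE A (Python) =====
-- inf = 10**18
--
-- def calc(x,y):
--     res = [[-1,inf],[-1,inf]]
--     lx = len(x)
--     y = [-1*inf] + y + [inf]
--     ly = len(y)
--
--     if lx == 0 or ly == 2:
--         return res
--
--     idx = 1
--     for i in range(lx):
--         while y[idx] < x[i]:
--             idx += 1
--         near = min(y[idx] - x[i], x[i] - y[idx-1])
--         if near < res[0][1]:
--             res[1] = res[0][::]
--             res[0] = [i,near]
--         elif near < res[1][1]:
--             res[1] = [i,near]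
--
--     return res
-- ===== SOURCE B (Python) =====
-- inf = 10**18
--
-- def calc(x, y):
--     ys = [-inf] + y + [inf]
--     if len(x) == 0 or len(ys) == 2:
--         return [[-1, inf], [-1, inf]]
--     # phase 1: the same monotone two-pointer, but it only records distances
--     dists = []
--     idx = 1
--     for xi in x:
--         while ys[idx] < xi:
--             idx += 1
--         dists.append(min(ys[idx] - xi, xi - ys[idx - 1]))
--     # phase 2: pick the two smallest by a stable sort (earliest index wins ties)
--     best = sorted(enumerate(dists), key=lambda t: t[1])[:2]
--     res = [[i, d] for i, d in best]
--     while len(res) < 2: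
--         res.append([-1, inf])
--     return res
-- ===== Notes on version B (the rewrite author's own statement) =====
-- stated objective: alternative
-- what changed: A fuses distance computation with an online two-slot (best/second-best) selection in one loop; B first records all nearest-y distances with the same monotone two-pointer, then selects the two smallest by a stable sort of the enumerated distances (take 2, pad with the default slots).
import Mathlib
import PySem

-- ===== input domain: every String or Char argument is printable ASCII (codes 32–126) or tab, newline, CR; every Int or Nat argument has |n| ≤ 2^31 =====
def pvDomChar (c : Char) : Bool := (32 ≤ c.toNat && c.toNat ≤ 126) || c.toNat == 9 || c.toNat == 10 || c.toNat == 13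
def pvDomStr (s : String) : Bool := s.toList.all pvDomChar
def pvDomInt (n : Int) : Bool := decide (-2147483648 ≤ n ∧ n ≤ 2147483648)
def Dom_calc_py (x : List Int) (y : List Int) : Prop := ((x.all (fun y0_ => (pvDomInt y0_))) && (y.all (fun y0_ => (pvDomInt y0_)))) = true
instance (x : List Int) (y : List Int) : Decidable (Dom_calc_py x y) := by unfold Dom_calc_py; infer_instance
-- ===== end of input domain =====

-- B recomputes A's result in two phases (the same two-pointer, but recording all distances,
-- then a stable sort selects the two smallest) instead of A's fused online two-slot selection.
-- Objective: alternative decomposition, no speed claim.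

-- ===== PORT A =====
def pvInf : Int := 10 ^ 18

-- the inner `while y[idx] < x[i]: idx += 1` loop (textually shared by A and B's phase 1)
def pvAdvance (ys : List Int) (xi : Int) (idx : Nat) : Nat :=
  if h : idx < ys.length then
    if ys[idx] < xi then pvAdvance ys xi (idx + 1) else idx
  else idx
termination_by ys.length - idx

def pvStepA (ys : List Int) (st : Nat × (Int × Int) × (Int × Int)) (p : Int × Int) :
    Nat × (Int × Int) × (Int × Int) :=
  let idx := pvAdvance ys p.2 st.1
  let near := min (PySem.List.pyGetD ys (idx : Int) 0 - p.2)
                  (p.2 - PySem.List.pyGetD ys ((idx : Int) - 1) 0)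
  if near < st.2.1.2 then (idx, (p.1, near), st.2.1)
  else if near < st.2.2.2 then (idx, st.2.1, (p.1, near))
  else (idx, st.2.1, st.2.2)

def calc_py (x : List Int) (y : List Int) : List (List Int) :=
  let ys := -pvInf :: (y ++ [pvInf])
  if x.length = 0 ∨ ys.length = 2 then [[-1, pvInf], [-1, pvInf]]
  else
    let st := (PySem.List.enumerate x 0).foldl (pvStepA ys) (1, ((-1, pvInf), (-1, pvInf)))
    [[st.2.1.1, st.2.1.2], [st.2.2.1, st.2.2.2]]

-- ===== PORT B =====
def pvStepB (ys : List Int) (st : Nat × List Int) (xi : Int) : Nat × List Int :=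
  let idx := pvAdvance ys xi st.1
  (idx, st.2 ++ [min (PySem.List.pyGetD ys (idx : Int) 0 - xi)
                     (xi - PySem.List.pyGetD ys ((idx : Int) - 1) 0)])

def calc_py_alt (x : List Int) (y : List Int) : List (List Int) :=
  let ys := -pvInf :: (y ++ [pvInf])
  if x.length = 0 ∨ ys.length = 2 then [[-1, pvInf], [-1, pvInf]]
  else
    let dists := (x.foldl (pvStepB ys) (1, [])).2
    let best := (PySem.List.sorted (PySem.List.enumerate dists 0) (fun t => t.2)).take 2
    let res := best.map (fun p => [p.1, p.2])
    res ++ List.replicate (2 - res.length) [-1, pvInf]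

-- ===== PRECONDITION & SPEC =====
def Spec_calc_py (x : List Int) (y : List Int) (out : List (List Int)) : Prop := out = calc_py_alt x y
instance (x : List Int) (y : List Int) (out : List (List Int)) : Decidable (Spec_calc_py x y out) := by unfold Spec_calc_py; infer_instance

-- ===== CLAIM (what is proved, stated in full; the proofs are below) =====
def Claim_equal_calc_py : Prop := ∀ (x : List Int) (y : List Int), Dom_calc_py x y → Spec_calc_py x y (calc_py x y)

-- ===== LEMMAS AND PROOFS =====

-- the distances B's phase 1 records, as a structural function
def pvDists (ys : List Int) (idx : Nat) : List Int → List Int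
  | [] => []
  | xi :: xs =>
    let i := pvAdvance ys xi idx
    (min (PySem.List.pyGetD ys (i : Int) 0 - xi)
         (xi - PySem.List.pyGetD ys ((i : Int) - 1) 0)) :: pvDists ys i xs

-- A's online two-slot selection step, on (index, dist) pairs
def pvSel (s : (Int × Int) × (Int × Int)) (p : Int × Int) : (Int × Int) × (Int × Int) :=
  if p.2 < s.1.2 then (p, s.1) else if p.2 < s.2.2 then (s.1, p) else s

-- first two entries of a list, padded with the default slot
def pvTwo (L : List (Int × Int)) : (Int × Int) × (Int × Int) :=
  (L.getD 0 (-1, pvInf), L.getD 1 (-1, pvInf))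

-- B's phase 1 fold computes pvDists
lemma pv_stepB_dists (ys : List Int) (xs : List Int) (idx : Nat) (acc : List Int) :
    (xs.foldl (pvStepB ys) (idx, acc)).2 = acc ++ pvDists ys idx xs := by
  induction xs generalizing idx acc with
  | nil => simp [pvDists]
  | cons a t ih => simp [pvStepB, pvDists, ih]

-- A's fused fold equals the selection fold over the enumerated recorded distances
lemma pv_stepA_fuse (ys : List Int) (xs : List Int) (s : Int) (idx : Nat)
    (sel : (Int × Int) × (Int × Int)) :
    ((PySem.List.enumerate xs s).foldl (pvStepA ys) (idx, sel)).2 =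
      (PySem.List.enumerate (pvDists ys idx xs) s).foldl pvSel sel := by
  induction xs generalizing s idx sel with
  | nil => simp [pvDists, PySem.List.enumerate_nil]
  | cons a t ih =>
      rw [pvDists, PySem.List.enumerate_cons, PySem.List.enumerate_cons]
      simp only [List.foldl_cons]
      rw [← ih]
      congr 1
      simp [pvStepA, pvSel]
      split_ifs <;> rfl

-- inserting one pair with distance < pvInf acts on the first two slots exactly as pvSel
lemma pv_two_insert (p : Int × Int) (hp : p.2 < pvInf) (L : List (Int × Int)) :
    pvTwo (PySem.List.insertBy (fun a b => decide (a.2 < b.2)) p L) = pvSel (pvTwo L) p := by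
  match L with
  | [] => simp [PySem.List.insertBy, pvTwo, pvSel, hp]
  | [a] =>
      by_cases h : p.2 < a.2 <;>
        simp [PySem.List.insertBy, pvTwo, pvSel, h, hp]
  | a :: b :: t =>
      by_cases h1 : p.2 < a.2
      · simp [PySem.List.insertBy, pvTwo, pvSel, h1]
      · by_cases h2 : p.2 < b.2 <;>
          simp [PySem.List.insertBy, pvTwo, pvSel, h1, h2]

-- the selection fold is pvTwo of the stable insertion-sort fold
lemma pv_fold_sel (es : List (Int × Int)) (h : ∀ p ∈ es, p.2 < pvInf) (L : List (Int × Int)) :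
    es.foldl pvSel (pvTwo L) =
      pvTwo (es.foldl (fun acc x => PySem.List.insertBy (fun a b => decide (a.2 < b.2)) x acc) L) := by
  induction es generalizing L with
  | nil => rfl
  | cons p t ih =>
      simp only [List.foldl_cons]
      rw [← pv_two_insert p (h p (by simp)) L]
      exact ih (fun q hq => h q (by simp [hq])) _

-- pvAdvance only moves the pointer right
lemma pv_advance_ge (ys : List Int) (xi : Int) (idx : Nat) : idx ≤ pvAdvance ys xi idx := by
  induction idx using pvAdvance.induct ys xi with
  | case1 idx h hlt ih => rw [pvAdvance]; simp [h, hlt]; omega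
  | case2 idx h hlt => rw [pvAdvance]; simp [h, hlt]
  | case3 idx h => rw [pvAdvance]; simp [h]

-- pvAdvance stops no later than the first position whose value is ≥ xi
lemma pv_advance_le (ys : List Int) (xi : Int) (idx j : Nat) (hij : idx ≤ j)
    (hj : j < ys.length) (hv : ¬ ys[j] < xi) : pvAdvance ys xi idx ≤ j := by
  induction idx using pvAdvance.induct ys xi with
  | case1 idx h hlt ih =>
      rw [pvAdvance]; simp only [h, dif_pos, hlt, if_pos]
      have : idx ≠ j := by rintro rfl; exact hv hlt
      exact ih (by omega)
  | case2 idx h hlt => rw [pvAdvance]; simp [h, hlt]; omega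
  | case3 idx h => rw [pvAdvance]; simp [h]; omega

-- interior entries of the padded list are members of y
lemma pv_ys_mem (y : List Int) (i : Nat) (h1 : 1 ≤ i) (h2 : i ≤ y.length) :
    (-pvInf :: (y ++ [pvInf])).getD i 0 ∈ y := by
  match i, h1 with
  | Nat.succ k, _ =>
      have hk : k < y.length := by omega
      rw [List.getD_cons_succ, List.getD_eq_getElem?_getD, List.getElem?_append_left hk,
          List.getElem?_eq_getElem hk]
      exact List.getElem_mem hk

-- the position after all of y holds the sentinel pvInf
lemma pv_ys_last (y : List Int) (h : y.length + 1 < (-pvInf :: (y ++ [pvInf])).length) :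
    (-pvInf :: (y ++ [pvInf]))[y.length + 1] = pvInf := by
  simp [List.getElem_cons_succ]

-- every distance the two-pointer records is < pvInf
lemma pv_dists_lt (y : List Int) (hy : y ≠ []) (xs : List Int)
    (hx : ∀ a ∈ xs, -2147483648 ≤ a ∧ a ≤ 2147483648)
    (hyb : ∀ a ∈ y, -2147483648 ≤ a ∧ a ≤ 2147483648)
    (idx : Nat) (h1 : 1 ≤ idx) (h2 : idx ≤ y.length + 1) :
    ∀ d ∈ pvDists (-pvInf :: (y ++ [pvInf])) idx xs, d < pvInf := by
  induction xs generalizing idx with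
  | nil => simp [pvDists]
  | cons a t ih =>
      have hylen : 1 ≤ y.length := List.length_pos_of_ne_nil hy
      have hlen : (-pvInf :: (y ++ [pvInf])).length = y.length + 2 := by simp
      have hax := hx a (by simp)
      have hlast : ¬ (-pvInf :: (y ++ [pvInf]))[y.length + 1]'(by omega) < a := by
        rw [pv_ys_last y (by omega)]
        have h2 := hax.2
        simp only [pvInf]; omega
      have hi1 : 1 ≤ pvAdvance (-pvInf :: (y ++ [pvInf])) a idx :=
        le_trans h1 (pv_advance_ge _ a idx)
      have hi2 : pvAdvance (-pvInf :: (y ++ [pvInf])) a idx ≤ y.length + 1 :=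
        pv_advance_le _ a idx (y.length + 1) h2 (by omega) hlast
      intro d hd
      rw [pvDists] at hd
      simp only [List.mem_cons] at hd
      rcases hd with rfl | hd
      · -- head distance
        have hget : ∀ (k : Nat), PySem.List.pyGetD (-pvInf :: (y ++ [pvInf])) (k : Int) 0 =
            (-pvInf :: (y ++ [pvInf])).getD k 0 :=
          fun k => PySem.List.pyGetD_natCast _ k 0
        by_cases hcase : pvAdvance (-pvInf :: (y ++ [pvInf])) a idx ≤ y.length
        · -- right neighbour is a member of y
          have hb := hyb _ (pv_ys_mem y _ hi1 hcase)
          refine lt_of_le_of_lt (min_le_left _ _) ?_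
          rw [hget]
          have h2 := hax.1
          simp only [pvInf] at hb ⊢; omega
        · -- the pointer sits on the right sentinel: left neighbour is y's last element
          have hieq : pvAdvance (-pvInf :: (y ++ [pvInf])) a idx = y.length + 1 := by omega
          have hcast : ((pvAdvance (-pvInf :: (y ++ [pvInf])) a idx : Nat) : Int) - 1 =
              ((y.length : Nat) : Int) := by rw [hieq]; push_cast; ring
          have hb := hyb _ (pv_ys_mem y y.length hylen (le_refl _))
          refine lt_of_le_of_lt (min_le_right _ _) ?_
          rw [hcast, hget]
          have h2 := hax.2
          simp only [pvInf] at hb ⊢; omega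
      · exact ih (fun b hb => hx b (by simp [hb])) _ hi1 hi2 d hd

-- listifying pvTwo is exactly "take 2, format, pad" (in simp-normal form)
lemma pv_two_take (L : List (Int × Int)) :
    [[(pvTwo L).1.1, (pvTwo L).1.2], [(pvTwo L).2.1, (pvTwo L).2.2]] =
      (L.map (fun p => [p.1, p.2])).take 2 ++
        List.replicate (2 - min 2 L.length) [-1, pvInf] := by
  match L with
  | [] => rfl
  | [a] => rfl
  | a :: b :: t => rfl

theorem calc_py_spec : Claim_equal_calc_py := by
  intro x y hdom
  unfold Spec_calc_py calc_py calc_py_alt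
  simp only []
  by_cases hguard : x = [] ∨ y = []
  · rw [if_pos, if_pos] <;> simp [hguard]
  · have hxne : x ≠ [] := fun h => hguard (Or.inl h)
    have hyne : y ≠ [] := fun h => hguard (Or.inr h)
    rw [if_neg, if_neg] <;> try simp [hxne, hyne]
    have hdom' := hdom
    unfold Dom_calc_py at hdom'
    simp only [Bool.and_eq_true, List.all_eq_true] at hdom'
    have hxb : ∀ a ∈ x, -2147483648 ≤ a ∧ a ≤ 2147483648 := by
      intro a ha; have := hdom'.1 a ha; simpa [pvDomInt] using this
    have hyb : ∀ a ∈ y, -2147483648 ≤ a ∧ a ≤ 2147483648 := by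
      intro a ha; have := hdom'.2 a ha; simpa [pvDomInt] using this
    rw [pv_stepB_dists (-pvInf :: (y ++ [pvInf])) x 1 []]
    simp only [List.nil_append]
    have hbound : ∀ d ∈ pvDists (-pvInf :: (y ++ [pvInf])) 1 x, d < pvInf :=
      pv_dists_lt y hyne x hxb hyb 1 (le_refl 1) (by
        have := List.length_pos_of_ne_nil hyne; omega)
    have hebound : ∀ p ∈ PySem.List.enumerate (pvDists (-pvInf :: (y ++ [pvInf])) 1 x) 0,
        p.2 < pvInf := by
      intro p hp
      refine hbound _ ?_
      have hm := PySem.List.map_snd_enumerate (pvDists (-pvInf :: (y ++ [pvInf])) 1 x) (0 : Int)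
      rw [← hm]
      exact List.mem_map_of_mem hp
    have hsel :
        ((PySem.List.enumerate x 0).foldl (pvStepA (-pvInf :: (y ++ [pvInf])))
            (1, ((-1, pvInf), (-1, pvInf)))).2 =
          pvTwo (PySem.List.sorted
            (PySem.List.enumerate (pvDists (-pvInf :: (y ++ [pvInf])) 1 x) 0) (fun t => t.2)) := by
      rw [pv_stepA_fuse]
      rw [show (((-1 : Int), pvInf), ((-1 : Int), pvInf)) = pvTwo ([] : List (Int × Int)) from rfl]
      rw [pv_fold_sel _ hebound, PySem.List.sorted_eq_foldl_insertBy]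
    rw [hsel, pv_two_take]
    rw [PySem.List.length_sorted, PySem.List.length_enumerate]

-- ===== VERDICT (by name: the statement is the Claim_ definition above) =====
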